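-- pv_equiv track=rewrite | github.com/regouga/IA-2P-3A1S-1718 | proj2alunos/P1/classsol.py | followedVogels
-- ===== SOURCE A (Python) =====
-- def followedVogels(x):
--     consonants = "BCÇDFGHJKLMNPQRSTVWXYZbcçdfghjklmnpqrstvwxyz"
--     countFollowedVogels = 0
--     maxFollowedVogels = 0
--     countFollowedConsonants = 0
--     maxFollowedConsonants = 0
--     flagBeforeVogel = 0
--     flagBeforeConsonant = 0
--     for letter in x:
--         if letter in consonants:
--             countFollowedConsonants += 1
--             flagBeforeConsonant = 1
--
--             flagBeforeVogel = 0
--             if(maxFollowedVogels < countFollowedVogels):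
--                 maxFollowedVogels = countFollowedVogels
--             countFollowedVogels = 0
--         else:
--             flagBeforeConsonants = 0
--             if(maxFollowedConsonants < countFollowedConsonants):
--                 maxFollowedConsonants = countFollowedConsonants
--             countFollowedConsonants = 0
--
--             countFollowedVogels += 1
--             flagBeforeVogel = 1
--
--     if(maxFollowedVogels < countFollowedVogels):
--         maxFollowedVogels = countFollowedVogels
--
--     if(maxFollowedConsonants < countFollowedConsonants):
--         maxFollowedConsonants = countFollowedConsonants
--
--     return (maxFollowedVogels, maxFollowedConsonants)
-- ===== SOURCE B (Python) =====
-- def followedVogels(x):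
--     consonants = "BCÇDFGHJKLMNPQRSTVWXYZbcçdfghjklmnpqrstvwxyz"
--     maxV = 0
--     maxC = 0
--     i = 0
--     n = len(x)
--     while i < n:
--         isC = x[i] in consonants
--         j = i + 1
--         while j < n and (x[j] in consonants) == isC:
--             j += 1
--         if isC:
--             maxC = max(maxC, j - i)
--         else:
--             maxV = max(maxV, j - i)
--         i = j
--     return (maxV, maxC)
-- ===== Notes on version B (the rewrite author's own statement) =====
-- stated objective: alternative
-- what changed: Replaces A's single-pass per-character state machine (two running counters flushed into maxima on every class switch, plus dead flag variables) by a run scanner: an outer loop that finds each maximal same-class run with an inner scan and updates the corresponding maximum once per run.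
import Mathlib
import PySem

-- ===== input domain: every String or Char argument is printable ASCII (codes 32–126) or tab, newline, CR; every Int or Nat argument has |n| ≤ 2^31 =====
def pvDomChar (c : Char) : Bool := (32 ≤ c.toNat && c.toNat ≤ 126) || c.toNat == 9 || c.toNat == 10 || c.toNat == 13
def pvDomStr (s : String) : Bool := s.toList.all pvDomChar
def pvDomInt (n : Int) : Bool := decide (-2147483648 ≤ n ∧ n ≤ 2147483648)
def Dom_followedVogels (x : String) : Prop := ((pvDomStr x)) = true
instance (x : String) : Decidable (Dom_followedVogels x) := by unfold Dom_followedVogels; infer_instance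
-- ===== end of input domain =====

-- B is an alternative decomposition of equal cost: a run scanner (outer loop over maximal
-- same-class runs, inner scan measuring each run) instead of A's per-character state machine.

-- `letter in consonants` (the Python constant, verbatim, including Ç/ç)
def fvIsCons (c : Char) : Bool :=
  ("BCÇDFGHJKLMNPQRSTVWXYZbcçdfghjklmnpqrstvwxyz".toList).contains c

-- ===== PORT A =====
-- A's for-loop over the letters with its four live counters (the two flag variables A also
-- assigns are never read, so they are not part of the state).  State: (cv, mv, cc, mc).
def fvLoopA : Int → Int → Int → Int → List Char → Int × Int × Int × Int
  | cv, mv, cc, mc, [] => (cv, mv, cc, mc)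
  | cv, mv, cc, mc, letter :: rest =>
    if fvIsCons letter then
      fvLoopA 0 (if mv < cv then cv else mv) (cc + 1) mc rest
    else
      fvLoopA (cv + 1) mv 0 (if mc < cc then cc else mc) rest

def followedVogels (x : String) : Int × Int :=
  match fvLoopA 0 0 0 0 x.toList with
  | (cv, mv, cc, mc) =>
    ((if mv < cv then cv else mv), (if mc < cc then cc else mc))

-- ===== PORT B =====
-- Source B's outer while loop: take the maximal run of the class of the head (the inner
-- `while j < n and (x[j] in consonants) == isC` scan = takeWhile/dropWhile on the tail),
-- update the matching maximum with the run's length, continue after the run.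
def fvLoopB : Int → Int → List Char → Int × Int
  | mv, mc, [] => (mv, mc)
  | mv, mc, c :: t =>
    let run := t.takeWhile (fun d => fvIsCons d == fvIsCons c)
    let rest := t.dropWhile (fun d => fvIsCons d == fvIsCons c)
    if fvIsCons c then
      fvLoopB mv (max mc (1 + (run.length : Int))) rest
    else
      fvLoopB (max mv (1 + (run.length : Int))) mc rest
  termination_by _ _ l => l.length
  decreasing_by
    all_goals simpa using Nat.lt_succ_of_le (List.length_dropWhile_le _ _)

def followedVogels_alt (x : String) : Int × Int := fvLoopB 0 0 x.toList

-- ===== PRECONDITION & SPEC =====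
def Spec_followedVogels (x : String) (out : Int × Int) : Prop := out = followedVogels_alt x
instance (x : String) (out : Int × Int) : Decidable (Spec_followedVogels x out) := by unfold Spec_followedVogels; infer_instance

-- ===== CLAIM (what is proved, stated in full; the proofs are below) =====
def Claim_equal_followedVogels : Prop := ∀ (x : String), Dom_followedVogels x → Spec_followedVogels x (followedVogels x)

-- ===== LEMMAS AND PROOFS =====

-- the final flush A performs after the loop, written with `max`
def fvFinish : Int × Int × Int × Int → Int × Int
  | (cv, mv, cc, mc) => (max mv cv, max mc cc)

theorem fvIf_max (a b : Int) : (if a < b then b else a) = max a b := by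
  split <;> omega

theorem fvFinish_eq (cv mv cc mc : Int) :
    fvFinish (cv, mv, cc, mc) = ((if mv < cv then cv else mv), (if mc < cc then cc else mc)) := by
  simp [fvFinish, fvIf_max]

-- a consonant run is absorbed into cc (cv stays 0, mv untouched when 0 ≤ mv)
theorem fvRunC : ∀ (run : List Char) (rest : List Char) (mv cc mc : Int),
    (∀ d ∈ run, fvIsCons d = true) → 0 ≤ mv →
    fvLoopA 0 mv cc mc (run ++ rest) = fvLoopA 0 mv (cc + run.length) mc rest
  | [], rest, mv, cc, mc, _, _ => by simp
  | c :: t, rest, mv, cc, mc, h, hmv => by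
    have hc : fvIsCons c = true := h c (by simp)
    have ht : ∀ d ∈ t, fvIsCons d = true := fun d hd => h d (by simp [hd])
    simp only [List.cons_append, fvLoopA, hc, if_true]
    have : (if mv < 0 then (0:Int) else mv) = mv := by omega
    rw [this, fvRunC t rest mv (cc + 1) mc ht hmv]
    congr 1
    simp
    omega

-- a vowel run is absorbed into cv
theorem fvRunV : ∀ (run : List Char) (rest : List Char) (cv mv mc : Int),
    (∀ d ∈ run, fvIsCons d = false) → 0 ≤ mc →
    fvLoopA cv mv 0 mc (run ++ rest) = fvLoopA (cv + run.length) mv 0 mc rest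
  | [], rest, cv, mv, mc, _, _ => by simp
  | c :: t, rest, cv, mv, mc, h, hmc => by
    have hc : fvIsCons c = false := h c (by simp)
    have ht : ∀ d ∈ t, fvIsCons d = false := fun d hd => h d (by simp [hd])
    simp only [List.cons_append, fvLoopA, hc, Bool.false_eq_true, if_false]
    have : (if mc < 0 then (0:Int) else mc) = mc := by omega
    rw [this, fvRunV t rest (cv + 1) mv mc ht hmc]
    congr 1
    simp
    omega

-- at a class boundary (next char is a vowel, or end of input) cc may be flushed into mc
theorem fvFlushC (rest : List Char) (mv cc mc : Int) (hcc : 0 ≤ cc) (hmc : 0 ≤ mc)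
    (hrest : ∀ d, rest.head? = some d → fvIsCons d = false) :
    fvFinish (fvLoopA 0 mv cc mc rest) = fvFinish (fvLoopA 0 mv 0 (max mc cc) rest) := by
  cases rest with
  | nil =>
    show (max mv 0, max mc cc) = (max mv 0, max (max mc cc) 0)
    rw [max_eq_left (le_max_of_le_left hmc)]
  | cons d t =>
    have hd : fvIsCons d = false := hrest d rfl
    simp only [fvLoopA, hd, Bool.false_eq_true, if_false]
    have hx : (if mc < cc then cc else mc) = (if max mc cc < 0 then 0 else max mc cc) := by
      rcases le_total mc cc with h | h
      · rw [max_eq_right h]; split_ifs <;> omega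
      · rw [max_eq_left h]; split_ifs <;> omega
    rw [hx]

-- symmetric flush of cv into mv when the next char is a consonant (or end of input)
theorem fvFlushV (rest : List Char) (cv mv mc : Int) (hcv : 0 ≤ cv) (hmv : 0 ≤ mv)
    (hrest : ∀ d, rest.head? = some d → fvIsCons d = true) :
    fvFinish (fvLoopA cv mv 0 mc rest) = fvFinish (fvLoopA 0 (max mv cv) 0 mc rest) := by
  cases rest with
  | nil =>
    show (max mv cv, max mc 0) = (max (max mv cv) 0, max mc 0)
    rw [max_eq_left (le_max_of_le_left hmv)]
  | cons d t =>
    have hd : fvIsCons d = true := hrest d rfl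
    simp only [fvLoopA, hd, if_true]
    have hx : (if mv < cv then cv else mv) = (if max mv cv < 0 then 0 else max mv cv) := by
      rcases le_total mv cv with h | h
      · rw [max_eq_right h]; split_ifs <;> omega
      · rw [max_eq_left h]; split_ifs <;> omega
    rw [hx]

theorem fvDropWhile_head {p : Char → Bool} (l : List Char) :
    ∀ (d : Char), ((l.dropWhile p).head? = some d) → p d = false := by
  induction l with
  | nil => intro d h; simp [List.dropWhile] at h
  | cons c t ih =>
    intro d h
    rw [List.dropWhile_cons] at h
    split at h
    · exact ih d h
    · rename_i hc
      simp only [List.head?_cons, Option.some.injEq] at h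
      subst h
      simpa using hc

-- unfolding equation for B's run scanner on a nonempty list
theorem fvLoopB_cons (mv mc : Int) (c : Char) (t : List Char) :
    fvLoopB mv mc (c :: t) =
      (if fvIsCons c then
        fvLoopB mv (max mc (1 + ((t.takeWhile (fun d => fvIsCons d == fvIsCons c)).length : Int)))
          (t.dropWhile (fun d => fvIsCons d == fvIsCons c))
      else
        fvLoopB (max mv (1 + ((t.takeWhile (fun d => fvIsCons d == fvIsCons c)).length : Int)))
          mc (t.dropWhile (fun d => fvIsCons d == fvIsCons c))) := by
  rw [fvLoopB]

-- main invariant: finishing A's loop from a fresh-run state equals B's run scanner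
theorem fvMain : ∀ (l : List Char) (mv mc : Int), 0 ≤ mv → 0 ≤ mc →
    fvFinish (fvLoopA 0 mv 0 mc l) = fvLoopB mv mc l
  | [], mv, mc, hmv, hmc => by
    simp only [fvLoopA, fvLoopB, fvFinish, Prod.mk.injEq]
    constructor <;> omega
  | c :: t, mv, mc, hmv, hmc => by
    have hsplit : t = t.takeWhile (fun d => fvIsCons d == fvIsCons c)
        ++ t.dropWhile (fun d => fvIsCons d == fvIsCons c) :=
      (List.takeWhile_append_dropWhile).symm
    have hrunmem : ∀ d ∈ t.takeWhile (fun d => fvIsCons d == fvIsCons c),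
        fvIsCons d = fvIsCons c := by
      intro d hd
      have := List.mem_takeWhile_imp hd
      simpa using this
    have hrestlt : (t.dropWhile (fun d => fvIsCons d == fvIsCons c)).length < (c :: t).length :=
      Nat.lt_succ_of_le (List.length_dropWhile_le _ _)
    have hresthead : ∀ d, (t.dropWhile (fun d => fvIsCons d == fvIsCons c)).head? = some d →
        ¬ (fvIsCons d = fvIsCons c) := by
      intro d hd
      have := fvDropWhile_head (p := fun d => fvIsCons d == fvIsCons c) t d hd
      simpa using this
    by_cases hc : fvIsCons c = true
    · -- consonant run of length 1 + run.length
      have hstep : fvLoopA 0 mv 0 mc (c :: t) = fvLoopA 0 mv 1 mc t := by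
        simp only [fvLoopA, hc, if_true]
        congr 1
        omega
      rw [hstep]
      conv_lhs => rw [hsplit]
      rw [fvRunC _ _ mv 1 mc (fun d hd => by rw [hrunmem d hd, hc]) hmv]
      rw [fvFlushC _ mv _ mc (by positivity) hmc
          (fun d hd => by have := hresthead d hd; rw [hc] at this; simpa using this)]
      rw [fvMain _ mv _ hmv (le_max_of_le_left hmc), fvLoopB_cons]
      simp only [hc, if_true]
    · -- vowel run of length 1 + run.length
      have hc' : fvIsCons c = false := Bool.of_not_eq_true hc
      have hstep : fvLoopA 0 mv 0 mc (c :: t) = fvLoopA 1 mv 0 mc t := by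
        simp only [fvLoopA, hc', Bool.false_eq_true, if_false]
        congr 1
        omega
      rw [hstep]
      conv_lhs => rw [hsplit]
      rw [fvRunV _ _ 1 mv mc (fun d hd => by rw [hrunmem d hd, hc']) hmc]
      rw [fvFlushV _ _ mv mc (by positivity) hmv
          (fun d hd => by have := hresthead d hd; rw [hc'] at this; simpa using this)]
      rw [fvMain _ _ mc (le_max_of_le_left hmv) hmc, fvLoopB_cons]
      simp only [hc', Bool.false_eq_true, if_false]
  termination_by l _ _ _ _ => l.length
  decreasing_by all_goals exact hrestlt

theorem fvFollowed_eq_finish (x : String) :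
    followedVogels x = fvFinish (fvLoopA 0 0 0 0 x.toList) := by
  unfold followedVogels
  rcases h : fvLoopA 0 0 0 0 x.toList with ⟨cv, mv, cc, mc⟩
  rw [fvFinish_eq]

-- ===== VERDICT (by name: the statement is the Claim_ definition above) =====
theorem followedVogels_spec : Claim_equal_followedVogels := by
  intro x _
  unfold Spec_followedVogels followedVogels_alt
  rw [fvFollowed_eq_finish, fvMain x.toList 0 0 le_rfl le_rfl]
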